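-- pv_equiv track=rewrite | github.com/bbugyi200/dotfiles | home/lib/gai/src/status_state_machine/field_updates.py | _apply_description_update
-- ===== SOURCE A (Python) =====
-- _FIELD_HEADERS = (
--     "NAME:",
--     "DESCRIPTION:",
--     "PARENT:",
--     "CL:",
--     "BUG:",
--     "STATUS:",
--     "KICKSTART:",
--     "TEST TARGETS:",
--     "COMMITS:",
--     "HOOKS:",
--     "COMMENTS:",
--     "MENTORS:",
-- )
--
-- def _is_field_or_section_header(line: str) -> bool:
--     """Check if a line starts with a known ChangeSpec field/section header."""
--     return line.startswith(_FIELD_HEADERS)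
--
-- def _format_description_field(description: str) -> list[str]:
--     """Format a plain-text description into DESCRIPTION field lines.
--
--     Produces a ``DESCRIPTION:\\n`` header followed by 2-space-indented
--     continuation lines, matching the parser format.
--
--     Args:
--         description: Plain-text description (may contain newlines).
--
--     Returns:
--         List of formatted lines (each ending with ``\\n``).
--     """
--     result = ["DESCRIPTION:\n"]
--     for line in description.splitlines():
--         if line:
--             result.append(f"  {line}\n")
--         else:
--             result.append("\n")
--     return result
--
-- def _apply_description_update(
--     lines: list[str], changespec_name: str, new_description: str
-- ) -> str:
--     """Apply DESCRIPTION field update to file lines.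
--
--     Finds the target ChangeSpec by NAME, then replaces the DESCRIPTION header
--     and all its continuation lines (2-space-indented and blank lines) with
--     the newly formatted description.  Stops consuming old description lines
--     when it hits a known field header.
--
--     Args:
--         lines: Current file lines.
--         changespec_name: NAME of the ChangeSpec to update.
--         new_description: New plain-text description.
--
--     Returns:
--         Updated file content as a string.
--     """
--     updated_lines: list[str] = []
--     in_target_changespec = False
--     skipping_old_description = False
--
--     for line in lines:
--         # Track which ChangeSpec we're in
--         if line.startswith("NAME:"):
--             current_name = line.split(":", 1)[1].strip()
--             in_target_changespec = current_name == changespec_name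
--
--         # When skipping old description lines, check for end of description
--         if skipping_old_description:
--             if _is_field_or_section_header(line):
--                 # Hit the next field — stop skipping, emit this line normally
--                 skipping_old_description = False
--                 updated_lines.append(line)
--             # Otherwise it's a continuation line (2-space-indented or blank) — skip it
--             continue
--
--         # Replace DESCRIPTION header in the target ChangeSpec
--         if in_target_changespec and line.startswith("DESCRIPTION:"):
--             updated_lines.extend(_format_description_field(new_description))
--             skipping_old_description = True
--             continue
--
--         updated_lines.append(line)
--
--     return "".join(updated_lines)
-- ===== SOURCE B (Python) =====
-- # B: segment-based decomposition — split lines into NAME:-delimited segments,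
-- # rewrite the DESCRIPTION block only inside matching segments, then join.
--
-- _FIELD_HEADERS = (
--     "NAME:",
--     "DESCRIPTION:",
--     "PARENT:",
--     "CL:",
--     "BUG:",
--     "STATUS:",
--     "KICKSTART:",
--     "TEST TARGETS:",
--     "COMMITS:",
--     "HOOKS:",
--     "COMMENTS:",
--     "MENTORS:",
-- )
--
--
-- def _is_field_or_section_header(line: str) -> bool:
--     return line.startswith(_FIELD_HEADERS)
--
--
-- def _format_description_field(description: str) -> list[str]:
--     return ["DESCRIPTION:\n"] + [
--         f"  {line}\n" if line else "\n" for line in description.splitlines()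
--     ]
--
--
-- def _rewrite_segment(seg: list[str], new_description: str) -> list[str]:
--     """Rewrite every DESCRIPTION block of one matching segment."""
--     result: list[str] = []
--     i = 0
--     n = len(seg)
--     while i < n:
--         line = seg[i]
--         if line.startswith("DESCRIPTION:"):
--             result.extend(_format_description_field(new_description))
--             i += 1
--             while i < n and not _is_field_or_section_header(seg[i]):
--                 i += 1
--             if i < n:
--                 # the terminating header line is re-emitted verbatim
--                 result.append(seg[i])
--                 i += 1
--         else:
--             result.append(line)
--             i += 1
--     return result
--
--
-- def _segment_matches(seg: list[str], changespec_name: str) -> bool: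
--     """Does this segment belong to the named ChangeSpec?"""
--     if not seg:
--         return False
--     first = seg[0]
--     return first.startswith("NAME:") and first.split(":", 1)[1].strip() == changespec_name
--
--
-- def _apply_description_update(
--     lines: list[str], changespec_name: str, new_description: str
-- ) -> str:
--     # Split into a preamble segment plus one segment per NAME: line.
--     segments: list[list[str]] = []
--     current: list[str] = []
--     for line in lines:
--         if line.startswith("NAME:"):
--             segments.append(current)
--             current = [line]
--         else:
--             current.append(line)
--     segments.append(current)
--
--     out: list[str] = []
--     for seg in segments:
--         out.extend(
--             _rewrite_segment(seg, new_description)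
--             if _segment_matches(seg, changespec_name)
--             else seg
--         )
--     return "".join(out)
-- ===== Notes on version B (the rewrite author's own statement) =====
-- stated objective: alternative
-- what changed: A's single-pass state machine with in_target/skipping flags is replaced by a segment decomposition: split the file at NAME: lines into a preamble plus one segment per ChangeSpec, rewrite the DESCRIPTION block(s) only inside segments whose name matches, and concatenate.
import Mathlib
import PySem

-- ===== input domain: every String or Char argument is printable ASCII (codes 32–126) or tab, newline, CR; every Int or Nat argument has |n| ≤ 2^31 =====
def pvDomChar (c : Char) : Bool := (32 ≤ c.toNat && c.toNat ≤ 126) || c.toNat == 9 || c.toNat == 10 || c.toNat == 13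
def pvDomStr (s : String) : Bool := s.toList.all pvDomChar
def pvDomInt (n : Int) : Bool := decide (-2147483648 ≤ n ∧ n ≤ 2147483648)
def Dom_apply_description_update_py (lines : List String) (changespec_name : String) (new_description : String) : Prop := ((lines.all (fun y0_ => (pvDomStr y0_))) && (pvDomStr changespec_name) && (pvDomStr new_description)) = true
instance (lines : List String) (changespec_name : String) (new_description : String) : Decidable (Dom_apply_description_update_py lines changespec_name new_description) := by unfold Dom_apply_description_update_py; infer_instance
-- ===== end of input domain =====

-- B replaces A's single-pass three-flag state machine by a segment decomposition
-- (split at NAME: lines, rewrite matching segments, concatenate); objective: alternative.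

-- ===== PORT A =====

-- shared module-level helpers (both Pythons define the same ones)
-- line.startswith(_FIELD_HEADERS): the tuple form is the disjunction of the 12 prefixes
def pvIsHeader (line : String) : Bool :=
  PySem.Str.startswith line "NAME:" || PySem.Str.startswith line "DESCRIPTION:" ||
  PySem.Str.startswith line "PARENT:" || PySem.Str.startswith line "CL:" ||
  PySem.Str.startswith line "BUG:" || PySem.Str.startswith line "STATUS:" ||
  PySem.Str.startswith line "KICKSTART:" || PySem.Str.startswith line "TEST TARGETS:" ||
  PySem.Str.startswith line "COMMITS:" || PySem.Str.startswith line "HOOKS:" ||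
  PySem.Str.startswith line "COMMENTS:" || PySem.Str.startswith line "MENTORS:"

-- line.split(":", 1)[1].strip(); [1] exists whenever the callers reach it (the line
-- starts with "NAME:", so ':' occurs), where this is exact; .getD covers the dead branch
def pvParseName (line : String) : String :=
  PySem.Str.strip ((PySem.List.pyGet? ((PySem.Str.splitMax? line ":" 1).getD []) 1).getD "")

-- A's _format_description_field: a loop appending one formatted line at a time
def pvFmtDescA (description : String) : List String :=
  (PySem.Str.splitlines description).foldl
    (fun result line =>
      result ++ [if line ≠ "" then PySem.Str.join "" ["  ", line, "\n"] else "\n"])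
    ["DESCRIPTION:\n"]

-- A's single pass: state = (updated_lines, in_target_changespec, skipping_old_description)
def apply_description_update_py (lines : List String) (changespec_name : String) (new_description : String) : String :=
  let st := lines.foldl
    (fun (st : List String × Bool × Bool) line =>
      let in_t := if PySem.Str.startswith line "NAME:" then pvParseName line == changespec_name else st.2.1
      if st.2.2 then
        if pvIsHeader line then (st.1 ++ [line], in_t, false)
        else (st.1, in_t, true)
      else if in_t && PySem.Str.startswith line "DESCRIPTION:" then
        (st.1 ++ pvFmtDescA new_description, in_t, true)
      else (st.1 ++ [line], in_t, false))
    ([], false, false)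
  PySem.Str.join "" st.1

-- ===== PORT B =====

-- B's _format_description_field: header cons a comprehension
def pvFmtDescB (description : String) : List String :=
  "DESCRIPTION:\n" ::
    (PySem.Str.splitlines description).map
      (fun line => if line ≠ "" then PySem.Str.join "" ["  ", line, "\n"] else "\n")

-- B's _rewrite_segment: the index/while loop, as recursion on the segment; the inner
-- 'while i < n and not header: i += 1' is dropWhile
def pvRewriteSegment (seg : List String) (new_description : String) : List String :=
  match seg with
  | [] => []
  | line :: rest =>
    if PySem.Str.startswith line "DESCRIPTION:" then
      pvFmtDescB new_description ++
        (match h : rest.dropWhile (fun x => !pvIsHeader x) with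
         | [] => []
         | hd :: tl => hd :: pvRewriteSegment tl new_description)
    else line :: pvRewriteSegment rest new_description
termination_by seg.length
decreasing_by
  · have h1 : (rest.dropWhile (fun x => !pvIsHeader x)).length ≤ rest.length :=
      List.length_dropWhile_le _ _
    rw [h] at h1
    simp only [List.length_cons] at h1 ⊢
    omega
  · simp only [List.length_cons]
    omega

-- B's _segment_matches
def pvSegMatches (seg : List String) (changespec_name : String) : Bool :=
  match seg with
  | [] => false
  | first :: _ =>
    PySem.Str.startswith first "NAME:" && (pvParseName first == changespec_name)

def apply_description_update_py_alt (lines : List String) (changespec_name : String) (new_description : String) : String :=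
  let p := lines.foldl
    (fun (p : List (List String) × List String) line =>
      if PySem.Str.startswith line "NAME:" then (p.1 ++ [p.2], [line])
      else (p.1, p.2 ++ [line]))
    ([], [])
  let segments := p.1 ++ [p.2]
  PySem.Str.join ""
    (segments.foldl
      (fun out seg =>
        out ++
          (if pvSegMatches seg changespec_name
           then pvRewriteSegment seg new_description else seg))
      [])

-- ===== PRECONDITION & SPEC =====
def Spec_apply_description_update_py (lines : List String) (changespec_name : String) (new_description : String) (out : String) : Prop := out = apply_description_update_py_alt lines changespec_name new_description
instance (lines : List String) (changespec_name : String) (new_description : String) (out : String) : Decidable (Spec_apply_description_update_py lines changespec_name new_description out) := by unfold Spec_apply_description_update_py; infer_instance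

-- ===== CLAIM (what is proved, stated in full; the proofs are below) =====
def Claim_equal_apply_description_update_py : Prop := ∀ (lines : List String) (changespec_name : String) (new_description : String), Dom_apply_description_update_py lines changespec_name new_description → Spec_apply_description_update_py lines changespec_name new_description (apply_description_update_py lines changespec_name new_description)

-- ===== LEMMAS AND PROOFS =====

-- A's pass, as a recursion emitting the output list (name/fmt fixed)
def procA (name : String) (fmt : List String) (in_t skip : Bool) : List String → List String
  | [] => []
  | line :: rest =>
    let in_t' := if PySem.Str.startswith line "NAME:" then pvParseName line == name else in_t
    if skip then
      if pvIsHeader line then line :: procA name fmt in_t' false rest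
      else procA name fmt in_t' true rest
    else if in_t' && PySem.Str.startswith line "DESCRIPTION:" then
      fmt ++ procA name fmt in_t' true rest
    else line :: procA name fmt in_t' false rest

-- B's segmentation, as a recursion
def segsFrom (cur : List String) : List String → List (List String)
  | [] => [cur]
  | line :: rest =>
    if PySem.Str.startswith line "NAME:" then cur :: segsFrom [line] rest
    else segsFrom (cur ++ [line]) rest

-- per-segment output of B
def segOut (name d : String) (seg : List String) : List String :=
  if pvSegMatches seg name then pvRewriteSegment seg d else seg

lemma fmtAB (d : String) : pvFmtDescA d = pvFmtDescB d := by
  simp only [pvFmtDescA, pvFmtDescB, PySem.List.foldl_append_singleton_eq_map]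
  rfl

lemma foldA (name : String) (fmt : List String) :
    ∀ (lines : List String) (acc : List String) (in_t skip : Bool),
      (lines.foldl
        (fun (st : List String × Bool × Bool) line =>
          let in_t := if PySem.Str.startswith line "NAME:" then pvParseName line == name else st.2.1
          if st.2.2 then
            if pvIsHeader line then (st.1 ++ [line], in_t, false)
            else (st.1, in_t, true)
          else if in_t && PySem.Str.startswith line "DESCRIPTION:" then
            (st.1 ++ fmt, in_t, true)
          else (st.1 ++ [line], in_t, false))
        (acc, in_t, skip)).1 = acc ++ procA name fmt in_t skip lines := by
  intro lines
  induction lines with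
  | nil => intro acc in_t skip; simp [procA]
  | cons l rest ih =>
    intro acc in_t skip
    simp only [List.foldl_cons, procA]
    split_ifs <;> rw [ih] <;> simp [List.append_assoc]

lemma notboth (s : String) (h : PySem.Str.startswith s "NAME:" = true) :
    PySem.Str.startswith s "DESCRIPTION:" = false := by
  by_contra hc
  simp only [Bool.not_eq_false] at hc
  rw [PySem.Str.startswith_eq, PySem.Chars.startswith_iff] at h hc
  obtain ⟨t1, h1⟩ := h
  obtain ⟨t2, h2⟩ := hc
  rw [← h1] at h2
  simp [List.cons_append] at h2

-- entering a line that starts with NAME:, A's state is irrelevant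
lemma procA_name_head (name : String) (fmt : List String) (nm : String)
    (hnm : PySem.Str.startswith nm "NAME:" = true) (rest : List String)
    (i s : Bool) :
    procA name fmt i s (nm :: rest) =
      nm :: procA name fmt (pvParseName nm == name) false rest := by
  have h1 := hnm
  have h2 := notboth nm hnm
  simp only [PySem.Str.startswith_eq] at h1 h2
  simp at h1 h2
  cases s <;> cases i <;>
    simp [procA, pvIsHeader, h1, h2]

-- non-target body lines pass through unchanged
lemma procA_nontarget (name : String) (fmt : List String) :
    ∀ (body rest : List String),
      (∀ l ∈ body, PySem.Str.startswith l "NAME:" = false) →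
      procA name fmt false false (body ++ rest) = body ++ procA name fmt false false rest := by
  intro body
  induction body with
  | nil => intro rest _; simp
  | cons l b ih =>
    intro rest h
    have hl := h l (List.mem_cons_self)
    simp only [List.cons_append, procA, hl]
    simp [ih rest (fun x hx => h x (List.mem_cons_of_mem _ hx))]

def headNAME : List String → Prop
  | [] => True
  | r0 :: _ => PySem.Str.startswith r0 "NAME:" = true

lemma procA_headNAME (name : String) (fmt : List String) (rest : List String)
    (h : headNAME rest) (i j s t : Bool) :
    procA name fmt i s rest = procA name fmt j t rest := by
  cases rest with
  | nil => rfl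
  | cons r0 r' =>
    have hr0 : PySem.Str.startswith r0 "NAME:" = true := h
    rw [procA_name_head name fmt r0 hr0 r' i s, procA_name_head name fmt r0 hr0 r' j t]

-- skip-phase output of B (what the inner while loop of _rewrite_segment yields)
def skipOut (d : String) (body : List String) : List String :=
  match body.dropWhile (fun x => !pvIsHeader x) with
  | [] => []
  | hd :: tl => hd :: pvRewriteSegment tl d

lemma pvRewrite_nil (d : String) : pvRewriteSegment [] d = [] := by
  simp [pvRewriteSegment]

lemma pvRewrite_desc (d l : String) (b : List String)
    (hd : PySem.Str.startswith l "DESCRIPTION:" = true) :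
    pvRewriteSegment (l :: b) d = pvFmtDescB d ++ skipOut d b := by
  simp only [pvRewriteSegment, hd, if_true]
  congr 1
  unfold skipOut
  split <;> rename_i heq <;> simp [heq]

lemma pvRewrite_nondesc (d l : String) (b : List String)
    (hd : PySem.Str.startswith l "DESCRIPTION:" = false) :
    pvRewriteSegment (l :: b) d = l :: pvRewriteSegment b d := by
  simp only [pvRewriteSegment, hd, Bool.false_eq_true, if_false]

lemma skipOut_header (d l : String) (b : List String) (hh : pvIsHeader l = true) :
    skipOut d (l :: b) = l :: pvRewriteSegment b d := by
  simp [skipOut, hh]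

lemma skipOut_nonheader (d l : String) (b : List String) (hh : pvIsHeader l = false) :
    skipOut d (l :: b) = skipOut d b := by
  simp [skipOut, hh]

-- the crux: inside a matching segment, A's normal/skip phases equal B's rewrite
lemma procA_target (name d : String) :
    ∀ (n : Nat) (body rest : List String), body.length ≤ n →
      (∀ l ∈ body, PySem.Str.startswith l "NAME:" = false) →
      headNAME rest →
      procA name (pvFmtDescB d) true false (body ++ rest)
          = pvRewriteSegment body d ++ procA name (pvFmtDescB d) true false rest ∧
      procA name (pvFmtDescB d) true true (body ++ rest)
          = skipOut d body ++ procA name (pvFmtDescB d) true false rest := by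
  intro n
  induction n with
  | zero =>
    intro body rest hlen hb hr
    have hbe : body = [] := List.eq_nil_of_length_eq_zero (Nat.le_zero.mp hlen)
    subst hbe
    refine ⟨by simp [pvRewriteSegment], ?_⟩
    simp only [List.nil_append, skipOut, List.dropWhile_nil]
    simpa using procA_headNAME name (pvFmtDescB d) rest hr true true true false
  | succ n ih =>
    intro body rest hlen hb hr
    cases body with
    | nil =>
      refine ⟨by simp [pvRewriteSegment], ?_⟩
      simp only [List.nil_append, skipOut, List.dropWhile_nil]
      simpa using procA_headNAME name (pvFmtDescB d) rest hr true true true false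
    | cons l b =>
      have hl : PySem.Str.startswith l "NAME:" = false := hb l List.mem_cons_self
      have hb' : ∀ x ∈ b, PySem.Str.startswith x "NAME:" = false :=
        fun x hx => hb x (List.mem_cons_of_mem _ hx)
      have hlen' : b.length ≤ n := by
        simp only [List.length_cons] at hlen; omega
      obtain ⟨ih1, ih2⟩ := ih b rest hlen' hb' hr
      constructor
      · by_cases hd : PySem.Str.startswith l "DESCRIPTION:" = true
        · simp only [List.cons_append, procA, hl, hd, Bool.false_eq_true, if_false,
            Bool.and_true, if_true]
          rw [ih2, pvRewrite_desc d l b hd, List.append_assoc]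
        · simp only [Bool.not_eq_true] at hd
          simp only [List.cons_append, procA, hl, hd, Bool.false_eq_true, if_false,
            Bool.and_false]
          rw [ih1, pvRewrite_nondesc d l b hd]
          simp
      · by_cases hh : pvIsHeader l = true
        · simp only [List.cons_append, procA, hl, hh, Bool.false_eq_true, if_false, if_true]
          rw [ih1, skipOut_header d l b hh]
          simp
        · simp only [Bool.not_eq_true] at hh
          simp only [List.cons_append, procA, hl, hh, Bool.false_eq_true, if_false]
          rw [ih2, skipOut_nonheader d l b hh]
          simp

lemma dropWhile_head_false (q : String → Bool) (l : List String) (r0 : String)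
    (r' : List String) (h : l.dropWhile q = r0 :: r') : q r0 = false := by
  have hne : l.dropWhile q ≠ [] := by simp [h]
  have h2 := List.head_dropWhile_not q hne
  simp only [h, List.head_cons] at h2
  exact h2

lemma segOut_id (name d : String) (cur : List String)
    (h : ∀ l ∈ cur, PySem.Str.startswith l "NAME:" = false) :
    segOut name d cur = cur := by
  cases cur with
  | nil => simp [segOut, pvSegMatches]
  | cons c cs =>
    have hc := h c List.mem_cons_self
    simp only [PySem.Str.startswith_eq] at hc
    simp at hc
    simp [segOut, pvSegMatches, hc]

lemma segOut_match (name d nm : String) (body : List String)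
    (hnm : PySem.Str.startswith nm "NAME:" = true)
    (ht : (pvParseName nm == name) = true) :
    segOut name d (nm :: body) = pvRewriteSegment (nm :: body) d := by
  simp only [segOut, pvSegMatches, hnm, ht, Bool.and_self, if_true]

lemma segOut_nomatch (name d nm : String) (body : List String)
    (ht : (pvParseName nm == name) = false) :
    segOut name d (nm :: body) = nm :: body := by
  simp only [segOut, pvSegMatches, ht, Bool.and_false, Bool.false_eq_true, if_false]

lemma segsFrom_shift : ∀ (body : List String),
    (∀ l ∈ body, PySem.Str.startswith l "NAME:" = false) →
    ∀ (cur rest : List String), segsFrom cur (body ++ rest) = segsFrom (cur ++ body) rest := by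
  intro body
  induction body with
  | nil => intro _ cur rest; simp
  | cons l b ih =>
    intro h cur rest
    have hl := h l List.mem_cons_self
    simp only [List.cons_append, segsFrom, hl, Bool.false_eq_true, if_false]
    rw [ih (fun x hx => h x (List.mem_cons_of_mem _ hx)) (cur ++ [l]) rest]
    simp

-- a whole chain of segments, starting at a NAME line
set_option maxHeartbeats 1000000 in
lemma procA_segs (name d : String) :
    ∀ (n : Nat) (lines : List String) (nm : String), lines.length ≤ n →
      PySem.Str.startswith nm "NAME:" = true →
      ∀ (i s : Bool),
        procA name (pvFmtDescB d) i s (nm :: lines)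
          = (segsFrom [nm] lines).flatMap (segOut name d) := by
  intro n
  induction n with
  | zero =>
    intro lines nm hlen hnm i s
    have hle : lines = [] := List.eq_nil_of_length_eq_zero (Nat.le_zero.mp hlen)
    subst hle
    rw [procA_name_head name (pvFmtDescB d) nm hnm [] i s]
    cases ht : (pvParseName nm == name) with
    | true =>
      simp only [procA, segsFrom, List.flatMap_cons, List.flatMap_nil, List.append_nil]
      rw [segOut_match name d nm [] hnm ht,
        pvRewrite_nondesc d nm [] (notboth nm hnm), pvRewrite_nil]
    | false =>
      simp only [procA, segsFrom, List.flatMap_cons, List.flatMap_nil, List.append_nil]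
      rw [segOut_nomatch name d nm [] ht]
  | succ n ih =>
    intro lines nm hlen hnm i s
    obtain ⟨body, rest, rfl, hbody, hr⟩ :
        ∃ body rest, lines = body ++ rest ∧
          (∀ l ∈ body, PySem.Str.startswith l "NAME:" = false) ∧ headNAME rest := by
      refine ⟨lines.takeWhile (fun l => !PySem.Str.startswith l "NAME:"),
        lines.dropWhile (fun l => !PySem.Str.startswith l "NAME:"),
        (List.takeWhile_append_dropWhile).symm, ?_, ?_⟩
      · intro l hl
        have := List.mem_takeWhile_imp hl
        simpa using this
      · cases hrest : lines.dropWhile (fun l => !PySem.Str.startswith l "NAME:") with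
        | nil => trivial
        | cons r0 r' =>
          show PySem.Str.startswith r0 "NAME:" = true
          have := dropWhile_head_false _ lines r0 r' hrest
          simpa using this
    rw [procA_name_head name (pvFmtDescB d) nm hnm (body ++ rest) i s]
    rw [segsFrom_shift body hbody [nm] rest]
    cases ht : (pvParseName nm == name) with
    | true =>
      obtain ⟨h1, _⟩ := procA_target name d body.length body rest le_rfl hbody hr
      rw [h1]
      cases rest with
      | nil =>
        simp only [procA, segsFrom, List.flatMap_cons, List.flatMap_nil,
          List.append_nil, List.singleton_append]
        rw [segOut_match name d nm body hnm ht,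
          pvRewrite_nondesc d nm body (notboth nm hnm)]
      | cons r0 r' =>
        have hr0 : PySem.Str.startswith r0 "NAME:" = true := hr
        have hlen' : r'.length ≤ n := by
          simp only [List.length_append, List.length_cons] at hlen; omega
        rw [ih r' r0 hlen' hr0 true false]
        simp only [segsFrom, hr0, if_true, List.flatMap_cons,
          List.singleton_append]
        rw [segOut_match name d nm body hnm ht,
          pvRewrite_nondesc d nm body (notboth nm hnm)]
        simp
    | false =>
      rw [procA_nontarget name (pvFmtDescB d) body rest hbody]
      cases rest with
      | nil =>
        simp only [procA, segsFrom, List.flatMap_cons, List.flatMap_nil,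
          List.append_nil, List.singleton_append]
        rw [segOut_nomatch name d nm body ht]
      | cons r0 r' =>
        have hr0 : PySem.Str.startswith r0 "NAME:" = true := hr
        have hlen' : r'.length ≤ n := by
          simp only [List.length_append, List.length_cons] at hlen; omega
        rw [ih r' r0 hlen' hr0 false false]
        simp only [segsFrom, hr0, if_true, List.flatMap_cons,
          List.singleton_append]
        rw [segOut_nomatch name d nm body ht]
        simp

lemma procA_all (name d : String) :
    ∀ (lines cur : List String),
      (∀ l ∈ cur, PySem.Str.startswith l "NAME:" = false) →
      cur ++ procA name (pvFmtDescB d) false false lines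
        = (segsFrom cur lines).flatMap (segOut name d) := by
  intro lines
  induction lines with
  | nil =>
    intro cur h
    simp [procA, segsFrom, segOut_id name d cur h]
  | cons l rest ih =>
    intro cur h
    cases hn : PySem.Str.startswith l "NAME:" with
    | true =>
      rw [procA_segs name d rest.length rest l le_rfl hn false false]
      simp only [segsFrom, hn, if_true, List.flatMap_cons]
      rw [segOut_id name d cur h]
    | false =>
      have hstep : procA name (pvFmtDescB d) false false (l :: rest)
          = l :: procA name (pvFmtDescB d) false false rest := by
        simp only [procA, hn, Bool.false_eq_true, if_false, Bool.false_and]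
      rw [hstep]
      have := ih (cur ++ [l]) (by
        intro x hx
        rcases List.mem_append.mp hx with hx | hx
        · exact h x hx
        · simp at hx; subst hx; exact hn)
      simp only [segsFrom, hn, Bool.false_eq_true, if_false]
      rw [← this]
      simp

lemma segsFold (lines : List String) :
    ∀ (segs : List (List String)) (cur : List String),
      (lines.foldl
        (fun (p : List (List String) × List String) line =>
          if PySem.Str.startswith line "NAME:" then (p.1 ++ [p.2], [line])
          else (p.1, p.2 ++ [line]))
        (segs, cur)).1 ++
      [(lines.foldl
        (fun (p : List (List String) × List String) line =>
          if PySem.Str.startswith line "NAME:" then (p.1 ++ [p.2], [line])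
          else (p.1, p.2 ++ [line]))
        (segs, cur)).2] = segs ++ segsFrom cur lines := by
  induction lines with
  | nil => intro segs cur; simp [segsFrom]
  | cons l rest ih =>
    intro segs cur
    cases hn : PySem.Str.startswith l "NAME:" with
    | true =>
      simp only [List.foldl_cons, hn, if_true]
      rw [ih (segs ++ [cur]) [l]]
      simp only [segsFrom, hn, if_true, List.append_assoc, List.singleton_append]
    | false =>
      simp only [List.foldl_cons, hn, Bool.false_eq_true, if_false]
      rw [ih segs (cur ++ [l])]
      simp only [segsFrom, hn, Bool.false_eq_true, if_false]

-- ===== VERDICT (by name: the statement is the Claim_ definition above) =====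
theorem apply_description_update_py_spec : Claim_equal_apply_description_update_py := by
  intro lines name d _
  show apply_description_update_py lines name d = apply_description_update_py_alt lines name d
  have h1 : apply_description_update_py lines name d
      = PySem.Str.join ""
          ((lines.foldl
            (fun (st : List String × Bool × Bool) line =>
              let in_t := if PySem.Str.startswith line "NAME:" then pvParseName line == name else st.2.1
              if st.2.2 then
                if pvIsHeader line then (st.1 ++ [line], in_t, false)
                else (st.1, in_t, true)
              else if in_t && PySem.Str.startswith line "DESCRIPTION:" then
                (st.1 ++ pvFmtDescA d, in_t, true)
              else (st.1 ++ [line], in_t, false))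
            ([], false, false)).1) := rfl
  have h2 : apply_description_update_py_alt lines name d
      = PySem.Str.join ""
          ((((lines.foldl
              (fun (p : List (List String) × List String) line =>
                if PySem.Str.startswith line "NAME:" then (p.1 ++ [p.2], [line])
                else (p.1, p.2 ++ [line]))
              ([], [])).1 ++
            [(lines.foldl
              (fun (p : List (List String) × List String) line =>
                if PySem.Str.startswith line "NAME:" then (p.1 ++ [p.2], [line])
                else (p.1, p.2 ++ [line]))
              ([], [])).2]).foldl
            (fun out seg =>
              out ++
                (if pvSegMatches seg name
                 then pvRewriteSegment seg d else seg))
            [])) := rfl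
  rw [h1, h2, foldA name (pvFmtDescA d) lines [] false false, fmtAB d]
  rw [segsFold lines [] []]
  rw [show (fun (out seg : List String) =>
        out ++ (if pvSegMatches seg name then pvRewriteSegment seg d else seg))
      = (fun (out : List String) (seg : List String) => out ++ segOut name d seg) from rfl]
  rw [PySem.List.foldl_append_eq_flatMap (segOut name d)]
  have := procA_all name d lines [] (by simp)
  simp only [List.nil_append] at this ⊢
  rw [this]
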